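-- pv_equiv track=rewrite | github.com/edvinbaggman/exjobb | analyzeLogs/attack_sources_ip.py | get_overlapping
-- ===== SOURCE A (Python) =====
-- def get_overlapping(ips1, ips2, ips3):
--     overlapping = {
--         1: 0,
--         2: 0,
--         3: 0,
--         12: 0,
--         13: 0,
--         23: 0,
--         123: 0,
--     }
--     for ip in ips1:
--         if ip in ips2:
--             if ip in ips3:
--                 overlapping[123] += 1
--             else:
--                 overlapping[12] += 1
--         elif ip in ips3:
--             overlapping[13] += 1
--         else: overlapping[1] += 1
--
--     for ip in ips2:
--         if ip in ips3:
--             if ip not in ips1: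
--                 overlapping[23] += 1
--         elif ip not in ips1:
--             overlapping[2] += 1
--
--     for ip in ips3:
--         if ip not in ips1 and ip not in ips2:
--             overlapping[3] += 1
--
--     return overlapping
-- ===== SOURCE B (Python) =====
-- def get_overlapping(ips1, ips2, ips3):
--     # Build a signature table in one dict pass per list (no membership tests
--     # against the other lists): key[ip] = digit-concatenation of the lists that
--     # contain ip, first[ip] = number of occurrences of ip in the first list
--     # containing it; then aggregate the table into the 7-key result.
--     key = {}
--     first = {}
--     for ip in ips1:
--         if key.get(ip) is None:
--             key[ip] = 1
--             first[ip] = 1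
--         else:
--             first[ip] += 1
--     for ip in ips2:
--         k = key.get(ip)
--         if k is None:
--             key[ip] = 2
--             first[ip] = 1
--         elif k == 2:
--             first[ip] += 1
--         elif k == 1:
--             key[ip] = 12
--     for ip in ips3:
--         k = key.get(ip)
--         if k is None:
--             key[ip] = 3
--             first[ip] = 1
--         elif k == 3:
--             first[ip] += 1
--         elif k % 10 != 3:
--             key[ip] = k * 10 + 3
--     res = {1: 0, 2: 0, 3: 0, 12: 0, 13: 0, 23: 0, 123: 0}
--     for ip, k in key.items():
--         res[k] += first[ip]
--     return res
-- ===== Notes on version B (the rewrite author's own statement) =====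
-- stated objective: faster
-- what changed: Instead of A's three branched loops that test every element's membership in the other lists, B makes one hash-dict pass per list building a per-distinct-ip signature table (which lists contain it, occurrence count in its first list) with no cross-list membership tests, then aggregates the table into the 7-key dict in one sweep.
import Mathlib
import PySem

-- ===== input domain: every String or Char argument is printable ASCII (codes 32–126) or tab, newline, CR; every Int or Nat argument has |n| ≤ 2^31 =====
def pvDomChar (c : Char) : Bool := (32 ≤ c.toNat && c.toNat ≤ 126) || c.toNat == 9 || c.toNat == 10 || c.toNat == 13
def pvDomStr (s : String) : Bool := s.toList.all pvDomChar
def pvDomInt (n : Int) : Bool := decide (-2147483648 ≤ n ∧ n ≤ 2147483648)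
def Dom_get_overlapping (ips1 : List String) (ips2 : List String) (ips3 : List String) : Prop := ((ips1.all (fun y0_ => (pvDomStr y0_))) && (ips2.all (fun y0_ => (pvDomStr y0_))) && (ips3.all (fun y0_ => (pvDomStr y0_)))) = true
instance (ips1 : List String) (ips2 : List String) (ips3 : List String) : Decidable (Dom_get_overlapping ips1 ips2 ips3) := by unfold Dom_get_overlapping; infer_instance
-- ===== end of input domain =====

-- B replaces A's three branched counting loops (per-element membership tests against the other
-- lists) by a per-distinct-ip signature table built in one dict pass per list, aggregated at the end.

-- ===== PORT A =====
-- Python `overlapping[k] += 1` on a dict whose keys are all preset: PySem.Dict.modify k 0 (·+1)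
-- is exact here (the key is always present, so KeyError is impossible and the default 0 is never used).
def get_overlapping (ips1 : List String) (ips2 : List String) (ips3 : List String) : List (Int × Int) :=
  let overlapping : PySem.Dict Int Int :=
    PySem.Dict.ofList [(1, 0), (2, 0), (3, 0), (12, 0), (13, 0), (23, 0), (123, 0)]
  let d1 := ips1.foldl (fun d ip =>
      if ips2.contains ip then
        if ips3.contains ip then d.modify 123 0 (· + 1)
        else d.modify 12 0 (· + 1)
      else if ips3.contains ip then d.modify 13 0 (· + 1)
      else d.modify 1 0 (· + 1)) overlapping
  let d2 := ips2.foldl (fun d ip =>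
      if ips3.contains ip then
        if !ips1.contains ip then d.modify 23 0 (· + 1) else d
      else if !ips1.contains ip then d.modify 2 0 (· + 1) else d) d1
  let d3 := ips3.foldl (fun d ip =>
      if !ips1.contains ip && !ips2.contains ip then d.modify 3 0 (· + 1) else d) d2
  d3.items

-- ===== PORT B =====
-- One step of each of B's three table-building loops. `key.get(ip)` is `Dict.get?`;
-- `first[ip] += 1` runs only when ip is already a key of `first`, so `modify ip 0 (·+1)` is
-- exact; `k % 10` is Python's % on ints: PySem.Int.mod.
def pvStep1 (st : PySem.Dict String Int × PySem.Dict String Int) (ip : String) :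
    PySem.Dict String Int × PySem.Dict String Int :=
  match st.1.get? ip with
  | none => (st.1.insert ip 1, st.2.insert ip 1)
  | some _ => (st.1, st.2.modify ip 0 (· + 1))

def pvStep2 (st : PySem.Dict String Int × PySem.Dict String Int) (ip : String) :
    PySem.Dict String Int × PySem.Dict String Int :=
  match st.1.get? ip with
  | none => (st.1.insert ip 2, st.2.insert ip 1)
  | some k =>
    if k = 2 then (st.1, st.2.modify ip 0 (· + 1))
    else if k = 1 then (st.1.insert ip 12, st.2)
    else st

def pvStep3 (st : PySem.Dict String Int × PySem.Dict String Int) (ip : String) :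
    PySem.Dict String Int × PySem.Dict String Int :=
  match st.1.get? ip with
  | none => (st.1.insert ip 3, st.2.insert ip 1)
  | some k =>
    if k = 3 then (st.1, st.2.modify ip 0 (· + 1))
    else if PySem.Int.mod k 10 ≠ 3 then (st.1.insert ip (k * 10 + 3), st.2)
    else st

-- `res[k] += first[ip]`: k is always one of the 7 preset keys of res and ip is always a key
-- of first (key and first always have the same keys), so the modify/getD defaults are never used.
def get_overlapping_alt (ips1 : List String) (ips2 : List String) (ips3 : List String) : List (Int × Int) :=
  let st1 := ips1.foldl pvStep1 (PySem.Dict.empty, PySem.Dict.empty)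
  let st2 := ips2.foldl pvStep2 st1
  let st3 := ips3.foldl pvStep3 st2
  let res : PySem.Dict Int Int :=
    PySem.Dict.ofList [(1, 0), (2, 0), (3, 0), (12, 0), (13, 0), (23, 0), (123, 0)]
  (st3.1.items.foldl (fun r p => r.modify p.2 0 (· + st3.2.getD p.1 0)) res).items

-- pair-form wrappers

-- ===== PRECONDITION & SPEC =====
def Spec_get_overlapping (ips1 : List String) (ips2 : List String) (ips3 : List String) (out : List (Int × Int)) : Prop := out = get_overlapping_alt ips1 ips2 ips3
instance (ips1 : List String) (ips2 : List String) (ips3 : List String) (out : List (Int × Int)) : Decidable (Spec_get_overlapping ips1 ips2 ips3 out) := by unfold Spec_get_overlapping; infer_instance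

-- ===== CLAIM (what is proved, stated in full; the proofs are below) =====
def Claim_equal_get_overlapping : Prop := ∀ (ips1 : List String) (ips2 : List String) (ips3 : List String), Dom_get_overlapping ips1 ips2 ips3 → Spec_get_overlapping ips1 ips2 ips3 (get_overlapping ips1 ips2 ips3)

-- ===== LEMMAS AND PROOFS =====

-- the list of first occurrences of elements of l that are not in s, in order (proof-only helper)
def pvNew (s : List String) : List String → List String
  | [] => []
  | x :: t => if x ∈ s then pvNew s t else x :: pvNew (s ++ [x]) t

lemma mem_pvNew (l : List String) (s : List String) (y : String) :
    y ∈ pvNew s l → y ∈ l ∧ y ∉ s := by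
  induction l generalizing s with
  | nil => simp [pvNew]
  | cons x t ih =>
    intro h
    by_cases hx : x ∈ s <;> simp only [pvNew, hx, if_true, if_false, List.mem_cons] at h
    · rcases ih s h with ⟨h1, h2⟩; exact ⟨List.mem_cons.2 (Or.inr h1), h2⟩
    · rcases h with rfl | h
      · exact ⟨List.mem_cons.2 (Or.inl rfl), hx⟩
      · rcases ih (s ++ [x]) h with ⟨h1, h2⟩
        simp only [List.mem_append, List.mem_singleton, not_or] at h2
        exact ⟨List.mem_cons.2 (Or.inr h1), h2.1⟩

lemma pvNew_complete (l : List String) (s : List String) (y : String) :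
    y ∈ l → y ∉ s → y ∈ pvNew s l := by
  induction l generalizing s with
  | nil => simp
  | cons x t ih =>
    intro hl hs
    by_cases hx : x ∈ s <;> simp only [pvNew, hx, if_true, if_false, List.mem_cons]
    · rcases List.mem_cons.1 hl with rfl | h
      · exact absurd hx hs
      · exact ih s h hs
    · by_cases hyx : y = x
      · exact Or.inl hyx
      · rcases List.mem_cons.1 hl with rfl | h
        · exact absurd rfl hyx
        · refine Or.inr (ih (s ++ [x]) h ?_)
          simp [hs, hyx]

lemma nodup_pvNew (l : List String) (s : List String) : (pvNew s l).Nodup := by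
  induction l generalizing s with
  | nil => simp [pvNew]
  | cons x t ih =>
    by_cases hx : x ∈ s <;> simp only [pvNew, hx, if_true, if_false]
    · exact ih s
    · refine List.nodup_cons.2 ⟨fun hm => ?_, ih _⟩
      have := (mem_pvNew _ _ _ hm).2
      simp at this

lemma update_eq_append_pvNew (l s : List String) :
    PySem.Set.update s l = s ++ pvNew s l := by
  induction l generalizing s with
  | nil => simp [PySem.Set.update, pvNew]
  | cons x t ih =>
    by_cases hx : x ∈ s
    · have h1 : PySem.Set.add s x = s := by simp [PySem.Set.add, PySem.Set.contains, hx]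
      simp only [PySem.Set.update, List.foldl_cons] at *
      rw [h1, ih, pvNew, if_pos hx]
    · have h1 : PySem.Set.add s x = s ++ [x] := by simp [PySem.Set.add, PySem.Set.contains, hx]
      simp only [PySem.Set.update, List.foldl_cons] at *
      rw [h1, ih, pvNew, if_neg hx, List.append_assoc]; rfl

lemma filter_split_at (t : List String) (s : List String) (x : String) (p : String → Bool)
    (hx : x ∉ s) :
    (t.filter (fun y => p y && !s.contains y)).length
    = (if p x then t.count x else 0) + (t.filter (fun y => p y && !(s ++ [x]).contains y)).length := by
  induction t with
  | nil => simp
  | cons z t ih =>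
    by_cases hzx : z = x
    · subst hzx
      have h1 : (s ++ [z]).contains z = true := by simp
      have h2 : s.contains z = false := by simpa using hx
      cases hp : p z
      · simp only [List.filter_cons, h1, h2, hp, Bool.not_true, Bool.not_false,
          Bool.and_false, Bool.false_and, Bool.false_eq_true, if_false]
        rw [ih]; simp [hp]
      · simp only [List.filter_cons, h1, h2, hp, Bool.not_true, Bool.not_false,
          Bool.and_false, Bool.true_and, Bool.false_eq_true, if_false, if_true,
          List.length_cons, List.count_cons_self]
        rw [ih]; simp [hp]; omega
    · have hcz : (s ++ [x]).contains z = s.contains z := by simp [hzx]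
      have hcx : (z :: t).count x = t.count x := by
        rw [List.count_cons]; simp [hzx, Ne.symm hzx]
      cases hb : (p z && !s.contains z)
      · simp only [List.filter_cons, hcz, hb, hcx, Bool.false_eq_true, if_false]
        exact ih
      · simp only [List.filter_cons, hcz, hb, hcx, if_true, List.length_cons]
        rw [ih]; omega

lemma pvNew_sum_count (l : List String) (s : List String) (p : String → Bool) :
    (((pvNew s l).filter p).map (fun y => (l.count y : Int))).sum
    = ((l.filter (fun y => p y && !s.contains y)).length : Int) := by
  induction l generalizing s with
  | nil => simp [pvNew]
  | cons x t ih =>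
    by_cases hx : x ∈ s
    · have hc : s.contains x = true := by simpa using hx
      rw [pvNew, if_pos hx]
      have hmap : ((pvNew s t).filter p).map (fun y => ((x :: t).count y : Int))
          = ((pvNew s t).filter p).map (fun y => (t.count y : Int)) := by
        apply List.map_congr_left
        intro y hy
        have hys : y ∉ s := (mem_pvNew _ _ _ (List.mem_of_mem_filter hy)).2
        have hne : y ≠ x := fun h => hys (h ▸ hx)
        rw [List.count_cons]; simp [hne, Ne.symm hne]
      rw [hmap, ih]
      simp only [List.filter_cons, hc, Bool.not_true, Bool.and_false, Bool.false_eq_true, if_false]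
    · have hc : s.contains x = false := by simpa using hx
      rw [pvNew, if_neg hx]
      have hsplit := filter_split_at t s x p hx
      have hmap : ((pvNew (s ++ [x]) t).filter p).map (fun y => ((x :: t).count y : Int))
          = ((pvNew (s ++ [x]) t).filter p).map (fun y => (t.count y : Int)) := by
        apply List.map_congr_left
        intro y hy
        have hys : y ∉ s ++ [x] := (mem_pvNew _ _ _ (List.mem_of_mem_filter hy)).2
        have hne : y ≠ x := by intro h; apply hys; simp [h]
        rw [List.count_cons]; simp [hne, Ne.symm hne]
      cases hp : p x
      · simp only [List.filter_cons, hp, hc, Bool.not_false, Bool.and_true,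
          Bool.false_eq_true, if_false]
        rw [hmap, ih (s ++ [x]), hsplit]
        simp [hp]
      · simp only [List.filter_cons, hp, hc, Bool.not_false, Bool.and_true, if_true,
          List.map_cons, List.sum_cons, List.count_cons_self, List.length_cons]
        rw [hmap, ih (s ++ [x]), hsplit]
        simp only [hp, if_true]
        push_cast; ring

lemma phase1_key (l : List String) (K F : PySem.Dict String Int) (y : String) :
    ((l.foldl pvStep1 (K, F)).1).get? y
    = if K.get? y = none ∧ y ∈ l then some 1 else K.get? y := by
  induction l generalizing K F with
  | nil => simp
  | cons x t ih =>
    simp only [List.foldl_cons]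
    cases hx : K.get? x with
    | none =>
      have hstep : pvStep1 (K, F) x = (K.insert x 1, F.insert x 1) := by
        simp [pvStep1, hx]
      rw [hstep, ih]
      by_cases hyx : y = x
      · subst hyx
        simp [PySem.Dict.get?_insert_self, hx]
      · rw [PySem.Dict.get?_insert_of_ne (hne := hyx)]
        simp [List.mem_cons, hyx]
    | some k =>
      have hstep : pvStep1 (K, F) x = (K, F.modify x 0 (· + 1)) := by
        simp [pvStep1, hx]
      rw [hstep, ih]
      by_cases hyx : y = x
      · subst hyx; simp [hx]
      · simp [List.mem_cons, hyx]

lemma phase1_first (l : List String) (K F : PySem.Dict String Int) (y : String) :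
    ((l.foldl pvStep1 (K, F)).2).getD y 0
    = if K.get? y = none then (if y ∈ l then (l.count y : Int) else F.getD y 0)
      else F.getD y 0 + (l.count y : Int) := by
  induction l generalizing K F with
  | nil => simp
  | cons x t ih =>
    simp only [List.foldl_cons]
    cases hx : K.get? x with
    | none =>
      have hstep : pvStep1 (K, F) x = (K.insert x 1, F.insert x 1) := by
        simp [pvStep1, hx]
      rw [hstep, ih]
      by_cases hyx : y = x
      · subst hyx
        rw [PySem.Dict.get?_insert_self]
        simp only [hx, reduceCtorEq, if_false, if_true, List.count_cons_self,
          List.mem_cons, true_or, if_pos]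
        rw [PySem.Dict.getD_insert]
        simp; push_cast; ring
      · rw [PySem.Dict.get?_insert_of_ne (hne := hyx), PySem.Dict.getD_insert]
        rw [List.count_cons]
        simp [List.mem_cons, hyx, Ne.symm hyx]
    | some k =>
      have hstep : pvStep1 (K, F) x = (K, F.modify x 0 (· + 1)) := by
        simp [pvStep1, hx]
      rw [hstep, ih]
      by_cases hyx : y = x
      · subst hyx
        rw [PySem.Dict.getD_modify]
        simp only [hx, reduceCtorEq, if_false, if_pos rfl, List.count_cons_self]
        push_cast; ring
      · rw [PySem.Dict.getD_modify, List.count_cons]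
        simp [List.mem_cons, hyx, Ne.symm hyx]

lemma phase2_key (l : List String) (K F : PySem.Dict String Int) (y : String) :
    ((l.foldl pvStep2 (K, F)).1).get? y
    = match K.get? y with
      | none => if y ∈ l then some 2 else none
      | some k => if k = 1 ∧ y ∈ l then some 12 else some k := by
  induction l generalizing K F with
  | nil => cases hy : K.get? y <;> simp [hy]
  | cons x t ih =>
    simp only [List.foldl_cons]
    cases hx : K.get? x with
    | none =>
      have hstep : pvStep2 (K, F) x = (K.insert x 2, F.insert x 1) := by
        simp [pvStep2, hx]
      rw [hstep, ih]
      by_cases hyx : y = x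
      · subst hyx
        rw [PySem.Dict.get?_insert_self]
        simp [hx]
      · rw [PySem.Dict.get?_insert_of_ne (hne := hyx)]
        cases hy : K.get? y <;> simp [List.mem_cons, hyx]
    | some k =>
      by_cases hk2 : k = 2
      · subst hk2
        have hstep : pvStep2 (K, F) x = (K, F.modify x 0 (· + 1)) := by
          simp [pvStep2, hx]
        rw [hstep, ih]
        by_cases hyx : y = x
        · subst hyx; simp [hx]
        · cases hy : K.get? y <;> simp [List.mem_cons, hyx]
      · by_cases hk1 : k = 1
        · subst hk1
          have hstep : pvStep2 (K, F) x = (K.insert x 12, F) := by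
            simp [pvStep2, hx]
          rw [hstep, ih]
          by_cases hyx : y = x
          · subst hyx
            rw [PySem.Dict.get?_insert_self]
            simp [hx]
          · rw [PySem.Dict.get?_insert_of_ne (hne := hyx)]
            cases hy : K.get? y <;> simp [List.mem_cons, hyx]
        · have hstep : pvStep2 (K, F) x = (K, F) := by
            simp [pvStep2, hx, hk2, hk1]
          rw [hstep, ih]
          by_cases hyx : y = x
          · subst hyx; simp [hx, hk1]
          · cases hy : K.get? y <;> simp [List.mem_cons, hyx]

lemma phase2_first (l : List String) (K F : PySem.Dict String Int) (y : String) :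
    ((l.foldl pvStep2 (K, F)).2).getD y 0
    = match K.get? y with
      | none => if y ∈ l then (l.count y : Int) else F.getD y 0
      | some k => F.getD y 0 + (if k = 2 then (l.count y : Int) else 0) := by
  induction l generalizing K F with
  | nil => cases hy : K.get? y <;> simp [hy]
  | cons x t ih =>
    simp only [List.foldl_cons]
    cases hx : K.get? x with
    | none =>
      have hstep : pvStep2 (K, F) x = (K.insert x 2, F.insert x 1) := by
        simp [pvStep2, hx]
      rw [hstep, ih]
      by_cases hyx : y = x
      · subst hyx
        rw [PySem.Dict.get?_insert_self, PySem.Dict.getD_insert]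
        simp only [hx, List.count_cons_self, if_pos rfl]
        simp; push_cast; ring
      · rw [PySem.Dict.get?_insert_of_ne (hne := hyx), PySem.Dict.getD_insert,
          List.count_cons]
        cases hy : K.get? y <;> simp [List.mem_cons, hyx, Ne.symm hyx]
    | some k =>
      by_cases hk2 : k = 2
      · subst hk2
        have hstep : pvStep2 (K, F) x = (K, F.modify x 0 (· + 1)) := by
          simp [pvStep2, hx]
        rw [hstep, ih]
        by_cases hyx : y = x
        · subst hyx
          rw [PySem.Dict.getD_modify]
          simp only [hx, if_pos rfl, List.count_cons_self]
          push_cast; ring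
        · rw [PySem.Dict.getD_modify, List.count_cons]
          cases hy : K.get? y <;> simp [hyx, Ne.symm hyx]
      · by_cases hk1 : k = 1
        · subst hk1
          have hstep : pvStep2 (K, F) x = (K.insert x 12, F) := by
            simp [pvStep2, hx]
          rw [hstep, ih]
          by_cases hyx : y = x
          · subst hyx
            rw [PySem.Dict.get?_insert_self]
            simp [hx]
          · rw [PySem.Dict.get?_insert_of_ne (hne := hyx), List.count_cons]
            cases hy : K.get? y <;> simp [hyx, Ne.symm hyx]
        · have hstep : pvStep2 (K, F) x = (K, F) := by
            simp [pvStep2, hx, hk2, hk1]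
          rw [hstep, ih]
          by_cases hyx : y = x
          · subst hyx; simp [hx, hk2]
          · rw [List.count_cons]
            cases hy : K.get? y <;> simp [hyx, Ne.symm hyx]

lemma mod10_shift (k : Int) : PySem.Int.mod (k * 10 + 3) 10 = 3 := by
  rw [PySem.Int.mod_eq_emod_of_pos (by omega)]
  omega

lemma phase3_key (l : List String) (K F : PySem.Dict String Int) (y : String) :
    ((l.foldl pvStep3 (K, F)).1).get? y
    = match K.get? y with
      | none => if y ∈ l then some 3 else none
      | some k => if PySem.Int.mod k 10 ≠ 3 ∧ y ∈ l then some (k * 10 + 3) else some k := by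
  induction l generalizing K F with
  | nil => cases hy : K.get? y <;> simp [hy]
  | cons x t ih =>
    simp only [List.foldl_cons]
    cases hx : K.get? x with
    | none =>
      have hstep : pvStep3 (K, F) x = (K.insert x 3, F.insert x 1) := by
        simp [pvStep3, hx]
      rw [hstep, ih]
      by_cases hyx : y = x
      · subst hyx
        rw [PySem.Dict.get?_insert_self]
        have : PySem.Int.mod 3 10 = 3 := by decide
        simp [hx, this]
      · rw [PySem.Dict.get?_insert_of_ne (hne := hyx)]
        cases hy : K.get? y <;> simp [List.mem_cons, hyx]
    | some k =>
      by_cases hk3 : k = 3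
      · subst hk3
        have hstep : pvStep3 (K, F) x = (K, F.modify x 0 (· + 1)) := by
          simp [pvStep3, hx]
        rw [hstep, ih]
        by_cases hyx : y = x
        · subst hyx
          have : PySem.Int.mod 3 10 = 3 := by decide
          simp [hx, this]
        · cases hy : K.get? y <;> simp [List.mem_cons, hyx]
      · have hmod : PySem.Int.mod k 10 = k % 10 := PySem.Int.mod_eq_emod_of_pos (by omega)
        have hs : (k * 10 + 3) % 10 = 3 := by omega
        by_cases hm : k % 10 = 3
        · have hstep : pvStep3 (K, F) x = (K, F) := by
            simp [pvStep3, hx, hk3, hmod, hm]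
          rw [hstep, ih]
          by_cases hyx : y = x
          · subst hyx; simp [hx, hmod, hm]
          · cases hy : K.get? y <;> simp [List.mem_cons, hyx]
        · have hstep : pvStep3 (K, F) x = (K.insert x (k * 10 + 3), F) := by
            simp [pvStep3, hx, hk3, hmod, hm]
          rw [hstep, ih]
          by_cases hyx : y = x
          · subst hyx
            rw [PySem.Dict.get?_insert_self]
            simp [hx, mod10_shift, hmod, hm, hs]
          · rw [PySem.Dict.get?_insert_of_ne (hne := hyx)]
            cases hy : K.get? y <;> simp [List.mem_cons, hyx]

lemma phase3_first (l : List String) (K F : PySem.Dict String Int) (y : String)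
    (h0 : ∀ z k, K.get? z = some k → k ≠ 0) :
    ((l.foldl pvStep3 (K, F)).2).getD y 0
    = match K.get? y with
      | none => if y ∈ l then (l.count y : Int) else F.getD y 0
      | some k => F.getD y 0 + (if k = 3 then (l.count y : Int) else 0) := by
  induction l generalizing K F with
  | nil => cases hy : K.get? y <;> simp [hy]
  | cons x t ih =>
    simp only [List.foldl_cons]
    cases hx : K.get? x with
    | none =>
      have hstep : pvStep3 (K, F) x = (K.insert x 3, F.insert x 1) := by
        simp [pvStep3, hx]
      have h0' : ∀ z k, (K.insert x 3).get? z = some k → k ≠ 0 := by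
        intro z k hz
        by_cases hzx : z = x
        · subst hzx; rw [PySem.Dict.get?_insert_self] at hz
          injection hz with h; omega
        · rw [PySem.Dict.get?_insert_of_ne (hne := hzx)] at hz
          exact h0 z k hz
      rw [hstep, ih _ _ h0']
      by_cases hyx : y = x
      · subst hyx
        rw [PySem.Dict.get?_insert_self, PySem.Dict.getD_insert]
        simp only [hx, List.count_cons_self, if_pos rfl]
        simp; push_cast; ring
      · rw [PySem.Dict.get?_insert_of_ne (hne := hyx), PySem.Dict.getD_insert,
          List.count_cons]
        cases hy : K.get? y <;> simp [List.mem_cons, hyx, Ne.symm hyx]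
    | some k =>
      by_cases hk3 : k = 3
      · subst hk3
        have hstep : pvStep3 (K, F) x = (K, F.modify x 0 (· + 1)) := by
          simp [pvStep3, hx]
        rw [hstep, ih _ _ h0]
        by_cases hyx : y = x
        · subst hyx
          rw [PySem.Dict.getD_modify]
          simp only [hx, if_pos rfl, List.count_cons_self]
          push_cast; ring
        · rw [PySem.Dict.getD_modify, List.count_cons]
          cases hy : K.get? y <;> simp [hyx, Ne.symm hyx]
      · have hmod : PySem.Int.mod k 10 = k % 10 := PySem.Int.mod_eq_emod_of_pos (by omega)
        have hs : (k * 10 + 3) % 10 = 3 := by omega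
        by_cases hm : k % 10 = 3
        · have hstep : pvStep3 (K, F) x = (K, F) := by
            simp [pvStep3, hx, hk3, hmod, hm]
          rw [hstep, ih _ _ h0]
          by_cases hyx : y = x
          · subst hyx; simp [hx, hk3]
          · rw [List.count_cons]
            cases hy : K.get? y <;> simp [hyx, Ne.symm hyx]
        · have hkz : k ≠ 0 := h0 x k hx
          have hstep : pvStep3 (K, F) x = (K.insert x (k * 10 + 3), F) := by
            simp [pvStep3, hx, hk3, hmod, hm]
          have h0' : ∀ z k', (K.insert x (k * 10 + 3)).get? z = some k' → k' ≠ 0 := by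
            intro z k' hz
            by_cases hzx : z = x
            · subst hzx; rw [PySem.Dict.get?_insert_self] at hz
              injection hz with h; omega
            · rw [PySem.Dict.get?_insert_of_ne (hne := hzx)] at hz
              exact h0 z k' hz
          rw [hstep, ih _ _ h0']
          by_cases hyx : y = x
          · subst hyx
            rw [PySem.Dict.get?_insert_self]
            have hne3 : ¬(k * 10 + 3 = 3) := by omega
            simp [hx, hne3, hk3]
          · rw [PySem.Dict.get?_insert_of_ne (hne := hyx), List.count_cons]
            cases hy : K.get? y <;> simp [hyx, Ne.symm hyx]

lemma nodup_update (s : List String) (l : List String) (h : s.Nodup) :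
    (PySem.Set.update s l).Nodup := by
  rw [update_eq_append_pvNew]
  refine List.Nodup.append h (nodup_pvNew _ _) ?_
  intro a ha hb
  exact (mem_pvNew _ _ _ hb).2 ha

lemma set_add_keys (K : PySem.Dict String Int) (x : String) (hx : K.get? x = none) :
    PySem.Set.add K.keys x = K.keys ++ [x] := by
  have : x ∉ K.keys := by
    intro hmem
    rw [PySem.Dict.get?_eq_none_iff_not_mem_keys] at hx
    exact hx hmem
  simp [PySem.Set.add, PySem.Set.contains, this]

lemma set_add_keys_mem (K : PySem.Dict String Int) (x : String) (k : Int)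
    (hx : K.get? x = some k) :
    PySem.Set.add K.keys x = K.keys := by
  have : x ∈ K.keys := by
    by_contra hmem
    rw [← PySem.Dict.get?_eq_none_iff_not_mem_keys] at hmem
    rw [hmem] at hx; cases hx
  simp [PySem.Set.add, PySem.Set.contains, this]

lemma phase1_keys (l : List String) (K F : PySem.Dict String Int) :
    ((l.foldl pvStep1 (K, F)).1).keys = PySem.Set.update K.keys l := by
  induction l generalizing K F with
  | nil => simp [PySem.Set.update]
  | cons x t ih =>
    simp only [List.foldl_cons]
    have hupd : PySem.Set.update K.keys (x :: t) = PySem.Set.update (PySem.Set.add K.keys x) t := by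
      simp [PySem.Set.update]
    rw [hupd]
    cases hx : K.get? x with
    | none =>
      have hc : K.contains x = false := by
        rw [PySem.Dict.contains_eq_isSome_get?, hx]; rfl
      have hstep : pvStep1 (K, F) x = (K.insert x 1, F.insert x 1) := by
        simp [pvStep1, hx]
      rw [hstep, ih, PySem.Dict.keys_insert_of_not_contains (h := hc), set_add_keys K x hx]
    | some k =>
      have hstep : pvStep1 (K, F) x = (K, F.modify x 0 (· + 1)) := by
        simp [pvStep1, hx]
      rw [hstep, ih, set_add_keys_mem K x k hx]

lemma phase2_keys (l : List String) (K F : PySem.Dict String Int) :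
    ((l.foldl pvStep2 (K, F)).1).keys = PySem.Set.update K.keys l := by
  induction l generalizing K F with
  | nil => simp [PySem.Set.update]
  | cons x t ih =>
    simp only [List.foldl_cons]
    have hupd : PySem.Set.update K.keys (x :: t) = PySem.Set.update (PySem.Set.add K.keys x) t := by
      simp [PySem.Set.update]
    rw [hupd]
    cases hx : K.get? x with
    | none =>
      have hc : K.contains x = false := by
        rw [PySem.Dict.contains_eq_isSome_get?, hx]; rfl
      have hstep : pvStep2 (K, F) x = (K.insert x 2, F.insert x 1) := by
        simp [pvStep2, hx]
      rw [hstep, ih, PySem.Dict.keys_insert_of_not_contains (h := hc), set_add_keys K x hx]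
    | some k =>
      rw [set_add_keys_mem K x k hx]
      have hc : K.contains x = true := by
        rw [PySem.Dict.contains_eq_isSome_get?, hx]; rfl
      by_cases hk2 : k = 2
      · subst hk2
        have hstep : pvStep2 (K, F) x = (K, F.modify x 0 (· + 1)) := by
          simp [pvStep2, hx]
        rw [hstep, ih]
      · by_cases hk1 : k = 1
        · subst hk1
          have hstep : pvStep2 (K, F) x = (K.insert x 12, F) := by
            simp [pvStep2, hx]
          rw [hstep, ih, PySem.Dict.keys_insert_of_contains (h := hc)]
        · have hstep : pvStep2 (K, F) x = (K, F) := by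
            simp [pvStep2, hx, hk2, hk1]
          rw [hstep, ih]

lemma phase3_keys (l : List String) (K F : PySem.Dict String Int) :
    ((l.foldl pvStep3 (K, F)).1).keys = PySem.Set.update K.keys l := by
  induction l generalizing K F with
  | nil => simp [PySem.Set.update]
  | cons x t ih =>
    simp only [List.foldl_cons]
    have hupd : PySem.Set.update K.keys (x :: t) = PySem.Set.update (PySem.Set.add K.keys x) t := by
      simp [PySem.Set.update]
    rw [hupd]
    cases hx : K.get? x with
    | none =>
      have hc : K.contains x = false := by
        rw [PySem.Dict.contains_eq_isSome_get?, hx]; rfl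
      have hstep : pvStep3 (K, F) x = (K.insert x 3, F.insert x 1) := by
        simp [pvStep3, hx]
      rw [hstep, ih, PySem.Dict.keys_insert_of_not_contains (h := hc), set_add_keys K x hx]
    | some k =>
      rw [set_add_keys_mem K x k hx]
      have hc : K.contains x = true := by
        rw [PySem.Dict.contains_eq_isSome_get?, hx]; rfl
      have hmod : PySem.Int.mod k 10 = k % 10 := PySem.Int.mod_eq_emod_of_pos (by omega)
      by_cases hk3 : k = 3
      · subst hk3
        have hstep : pvStep3 (K, F) x = (K, F.modify x 0 (· + 1)) := by
          simp [pvStep3, hx]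
        rw [hstep, ih]
      · by_cases hm : k % 10 = 3
        · have hstep : pvStep3 (K, F) x = (K, F) := by
            simp [pvStep3, hx, hk3, hmod, hm]
          rw [hstep, ih]
        · have hstep : pvStep3 (K, F) x = (K.insert x (k * 10 + 3), F) := by
            simp [pvStep3, hx, hk3, hmod, hm]
          rw [hstep, ih, PySem.Dict.keys_insert_of_contains (h := hc)]

lemma bump1 (v c1 c2 c3 c12 c13 c23 c123 : Int) :
  (PySem.Dict.mk [((1:Int),c1),(2,c2),(3,c3),(12,c12),(13,c13),(23,c23),(123,c123)]).modify 1 0 (· + v)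
  = PySem.Dict.mk [(1,c1+v),(2,c2),(3,c3),(12,c12),(13,c13),(23,c23),(123,c123)] := by rfl
lemma bump2 (v c1 c2 c3 c12 c13 c23 c123 : Int) :
  (PySem.Dict.mk [((1:Int),c1),(2,c2),(3,c3),(12,c12),(13,c13),(23,c23),(123,c123)]).modify 2 0 (· + v)
  = PySem.Dict.mk [(1,c1),(2,c2+v),(3,c3),(12,c12),(13,c13),(23,c23),(123,c123)] := by rfl
lemma bump3 (v c1 c2 c3 c12 c13 c23 c123 : Int) :
  (PySem.Dict.mk [((1:Int),c1),(2,c2),(3,c3),(12,c12),(13,c13),(23,c23),(123,c123)]).modify 3 0 (· + v)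
  = PySem.Dict.mk [(1,c1),(2,c2),(3,c3+v),(12,c12),(13,c13),(23,c23),(123,c123)] := by rfl
lemma bump12 (v c1 c2 c3 c12 c13 c23 c123 : Int) :
  (PySem.Dict.mk [((1:Int),c1),(2,c2),(3,c3),(12,c12),(13,c13),(23,c23),(123,c123)]).modify 12 0 (· + v)
  = PySem.Dict.mk [(1,c1),(2,c2),(3,c3),(12,c12+v),(13,c13),(23,c23),(123,c123)] := by rfl
lemma bump13 (v c1 c2 c3 c12 c13 c23 c123 : Int) :
  (PySem.Dict.mk [((1:Int),c1),(2,c2),(3,c3),(12,c12),(13,c13),(23,c23),(123,c123)]).modify 13 0 (· + v)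
  = PySem.Dict.mk [(1,c1),(2,c2),(3,c3),(12,c12),(13,c13+v),(23,c23),(123,c123)] := by rfl
lemma bump23 (v c1 c2 c3 c12 c13 c23 c123 : Int) :
  (PySem.Dict.mk [((1:Int),c1),(2,c2),(3,c3),(12,c12),(13,c13),(23,c23),(123,c123)]).modify 23 0 (· + v)
  = PySem.Dict.mk [(1,c1),(2,c2),(3,c3),(12,c12),(13,c13),(23,c23+v),(123,c123)] := by rfl
lemma bump123 (v c1 c2 c3 c12 c13 c23 c123 : Int) :
  (PySem.Dict.mk [((1:Int),c1),(2,c2),(3,c3),(12,c12),(13,c13),(23,c23),(123,c123)]).modify 123 0 (· + v)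
  = PySem.Dict.mk [(1,c1),(2,c2),(3,c3),(12,c12),(13,c13),(23,c23),(123,c123+v)] := by rfl

-- A's three loops, characterized as filter counts
lemma loopA1 (ips2 ips3 : List String) (l : List String) (c1 c2 c3 c12 c13 c23 c123 : Int) :
  l.foldl (fun d ip =>
      if ips2.contains ip then
        if ips3.contains ip then d.modify 123 0 (· + 1)
        else d.modify 12 0 (· + 1)
      else if ips3.contains ip then d.modify 13 0 (· + 1)
      else d.modify 1 0 (· + 1))
    (PySem.Dict.mk [((1:Int),c1),(2,c2),(3,c3),(12,c12),(13,c13),(23,c23),(123,c123)]) =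
  PySem.Dict.mk [(1, c1 + ((l.filter (fun ip => !ips2.contains ip && !ips3.contains ip)).length : Int)),
                 (2, c2), (3, c3),
                 (12, c12 + ((l.filter (fun ip => ips2.contains ip && !ips3.contains ip)).length : Int)),
                 (13, c13 + ((l.filter (fun ip => !ips2.contains ip && ips3.contains ip)).length : Int)),
                 (23, c23),
                 (123, c123 + ((l.filter (fun ip => ips2.contains ip && ips3.contains ip)).length : Int))] := by
  induction l generalizing c1 c12 c13 c123 with
  | nil => simp
  | cons x xs ih =>
    cases hc2 : ips2.contains x <;> cases hc3 : ips3.contains x <;>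
      simp only [List.foldl_cons, List.filter_cons, hc2, hc3, Bool.not_true, Bool.not_false,
        Bool.and_true, Bool.and_false, Bool.and_self,
        Bool.false_eq_true, if_true, if_false,
        bump1, bump12, bump13, bump123] <;>
      rw [ih] <;> simp only [PySem.Dict.mk.injEq, List.cons.injEq, Prod.mk.injEq, List.length_cons,
        Nat.cast_add, Nat.cast_one, and_true, true_and, and_self, eq_self_iff_true] <;> omega

lemma loopA2 (ips1 ips3 : List String) (l : List String) (c1 c2 c3 c12 c13 c23 c123 : Int) :
  l.foldl (fun d ip =>
      if ips3.contains ip then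
        if !ips1.contains ip then d.modify 23 0 (· + 1) else d
      else if !ips1.contains ip then d.modify 2 0 (· + 1) else d)
    (PySem.Dict.mk [((1:Int),c1),(2,c2),(3,c3),(12,c12),(13,c13),(23,c23),(123,c123)]) =
  PySem.Dict.mk [(1, c1),
                 (2, c2 + ((l.filter (fun ip => !ips1.contains ip && !ips3.contains ip)).length : Int)),
                 (3, c3), (12, c12), (13, c13),
                 (23, c23 + ((l.filter (fun ip => !ips1.contains ip && ips3.contains ip)).length : Int)),
                 (123, c123)] := by
  induction l generalizing c2 c23 with
  | nil => simp
  | cons x xs ih =>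
    cases hc1 : ips1.contains x <;> cases hc3 : ips3.contains x <;>
      simp only [List.foldl_cons, List.filter_cons, hc1, hc3, Bool.not_true, Bool.not_false,
        Bool.and_true, Bool.and_false, Bool.and_self,
        Bool.false_eq_true, if_true, if_false, bump2, bump23] <;>
      rw [ih] <;> simp only [PySem.Dict.mk.injEq, List.cons.injEq, Prod.mk.injEq, List.length_cons,
        Nat.cast_add, Nat.cast_one, and_true, true_and, and_self, eq_self_iff_true] <;> omega

lemma loopA3 (ips1 ips2 : List String) (l : List String) (c1 c2 c3 c12 c13 c23 c123 : Int) :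
  l.foldl (fun d ip =>
      if !ips1.contains ip && !ips2.contains ip then d.modify 3 0 (· + 1) else d)
    (PySem.Dict.mk [((1:Int),c1),(2,c2),(3,c3),(12,c12),(13,c13),(23,c23),(123,c123)]) =
  PySem.Dict.mk [(1, c1), (2, c2),
                 (3, c3 + ((l.filter (fun ip => !ips1.contains ip && !ips2.contains ip)).length : Int)),
                 (12, c12), (13, c13), (23, c23), (123, c123)] := by
  induction l generalizing c3 with
  | nil => simp
  | cons x xs ih =>
    cases hc1 : ips1.contains x <;> cases hc2 : ips2.contains x <;>
      simp only [List.foldl_cons, List.filter_cons, hc1, hc2, Bool.not_true, Bool.not_false,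
        Bool.and_true, Bool.and_false, Bool.and_self,
        Bool.false_eq_true, if_true, if_false, bump3] <;>
      rw [ih] <;> simp only [PySem.Dict.mk.injEq, List.cons.injEq, Prod.mk.injEq, List.length_cons,
        Nat.cast_add, Nat.cast_one, and_true, true_and, and_self, eq_self_iff_true] <;> omega


lemma aggLoop (pairs : List (String × Int)) (f : String → Int) (c1 c2 c3 c12 c13 c23 c123 : Int)
    (h : ∀ p ∈ pairs, p.2 = 1 ∨ p.2 = 2 ∨ p.2 = 3 ∨ p.2 = 12 ∨ p.2 = 13 ∨ p.2 = 23 ∨ p.2 = 123) :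
    pairs.foldl (fun r p => r.modify p.2 0 (· + f p.1))
      (PySem.Dict.mk [((1:Int),c1),(2,c2),(3,c3),(12,c12),(13,c13),(23,c23),(123,c123)])
    = PySem.Dict.mk
        [(1, c1 + ((pairs.filter (fun p => p.2 == 1)).map (fun p => f p.1)).sum),
         (2, c2 + ((pairs.filter (fun p => p.2 == 2)).map (fun p => f p.1)).sum),
         (3, c3 + ((pairs.filter (fun p => p.2 == 3)).map (fun p => f p.1)).sum),
         (12, c12 + ((pairs.filter (fun p => p.2 == 12)).map (fun p => f p.1)).sum),
         (13, c13 + ((pairs.filter (fun p => p.2 == 13)).map (fun p => f p.1)).sum),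
         (23, c23 + ((pairs.filter (fun p => p.2 == 23)).map (fun p => f p.1)).sum),
         (123, c123 + ((pairs.filter (fun p => p.2 == 123)).map (fun p => f p.1)).sum)] := by
  induction pairs generalizing c1 c2 c3 c12 c13 c23 c123 with
  | nil => simp
  | cons p rest ih =>
    obtain ⟨a, b⟩ := p
    have hb := h (a, b) List.mem_cons_self
    have hrest : ∀ q ∈ rest, q.2 = 1 ∨ q.2 = 2 ∨ q.2 = 3 ∨ q.2 = 12 ∨ q.2 = 13 ∨ q.2 = 23 ∨ q.2 = 123 :=
      fun q hq => h q (List.mem_cons_of_mem _ hq)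
    simp only [List.foldl_cons]
    dsimp only at hb ⊢
    rcases hb with rfl | rfl | rfl | rfl | rfl | rfl | rfl <;>
      simp only [bump1, bump2, bump3, bump12, bump13, bump23, bump123] <;>
      rw [ih _ _ _ _ _ _ _ hrest] <;>
      simp only [List.filter_cons, List.map_cons, List.sum_cons, PySem.Dict.mk.injEq,
        List.cons.injEq, Prod.mk.injEq, beq_iff_eq] <;>
      norm_num <;> omega

lemma phase2_key' (l : List String) (st : PySem.Dict String Int × PySem.Dict String Int) (y : String) :
    ((l.foldl pvStep2 st).1).get? y
    = match st.1.get? y with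
      | none => if y ∈ l then some 2 else none
      | some k => if k = 1 ∧ y ∈ l then some 12 else some k := by
  obtain ⟨K, F⟩ := st; exact phase2_key l K F y
lemma phase2_first' (l : List String) (st : PySem.Dict String Int × PySem.Dict String Int) (y : String) :
    ((l.foldl pvStep2 st).2).getD y 0
    = match st.1.get? y with
      | none => if y ∈ l then (l.count y : Int) else st.2.getD y 0
      | some k => st.2.getD y 0 + (if k = 2 then (l.count y : Int) else 0) := by
  obtain ⟨K, F⟩ := st; exact phase2_first l K F y
lemma phase3_key' (l : List String) (st : PySem.Dict String Int × PySem.Dict String Int) (y : String) :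
    ((l.foldl pvStep3 st).1).get? y
    = match st.1.get? y with
      | none => if y ∈ l then some 3 else none
      | some k => if PySem.Int.mod k 10 ≠ 3 ∧ y ∈ l then some (k * 10 + 3) else some k := by
  obtain ⟨K, F⟩ := st; exact phase3_key l K F y
lemma phase3_first' (l : List String) (st : PySem.Dict String Int × PySem.Dict String Int) (y : String)
    (h0 : ∀ z k, st.1.get? z = some k → k ≠ 0) :
    ((l.foldl pvStep3 st).2).getD y 0
    = match st.1.get? y with
      | none => if y ∈ l then (l.count y : Int) else st.2.getD y 0
      | some k => st.2.getD y 0 + (if k = 3 then (l.count y : Int) else 0) := by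
  obtain ⟨K, F⟩ := st; exact phase3_first l K F y h0
lemma phase2_keys' (l : List String) (st : PySem.Dict String Int × PySem.Dict String Int) :
    ((l.foldl pvStep2 st).1).keys = PySem.Set.update st.1.keys l := by
  obtain ⟨K, F⟩ := st; exact phase2_keys l K F
lemma phase3_keys' (l : List String) (st : PySem.Dict String Int × PySem.Dict String Int) :
    ((l.foldl pvStep3 st).1).keys = PySem.Set.update st.1.keys l := by
  obtain ⟨K, F⟩ := st; exact phase3_keys l K F

theorem main_eq (ips1 ips2 ips3 : List String) :
    get_overlapping ips1 ips2 ips3 = get_overlapping_alt ips1 ips2 ips3 := by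
  simp only [get_overlapping, get_overlapping_alt]
  set st1 := ips1.foldl pvStep1 (PySem.Dict.empty, PySem.Dict.empty) with hst1
  set st2 := ips2.foldl pvStep2 st1 with hst2
  set st3 := ips3.foldl pvStep3 st2 with hst3
  -- membership facts about the three key segments
  have hS1mem : ∀ y : String, y ∈ pvNew [] ips1 ↔ y ∈ ips1 := by
    intro y; constructor
    · intro h; exact (mem_pvNew _ _ _ h).1
    · intro h; exact pvNew_complete _ _ _ h (by simp)
  have hN2mem : ∀ y, y ∈ pvNew (pvNew [] ips1) ips2 → y ∈ ips2 ∧ y ∉ ips1 := by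
    intro y h; rcases mem_pvNew _ _ _ h with ⟨h1, h2⟩
    exact ⟨h1, fun hh => h2 ((hS1mem y).2 hh)⟩
  have hN2mem' : ∀ y, y ∈ ips2 → y ∉ ips1 → y ∈ pvNew (pvNew [] ips1) ips2 := by
    intro y h1 h2; exact pvNew_complete _ _ _ h1 (fun hh => h2 ((hS1mem y).1 hh))
  have hN3mem : ∀ y, y ∈ pvNew (pvNew [] ips1 ++ pvNew (pvNew [] ips1) ips2) ips3 →
      y ∈ ips3 ∧ y ∉ ips1 ∧ y ∉ ips2 := by
    intro y h; rcases mem_pvNew _ _ _ h with ⟨h1, h2⟩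
    simp only [List.mem_append, not_or] at h2
    refine ⟨h1, fun hh => h2.1 ((hS1mem y).2 hh), fun hh => ?_⟩
    by_cases hy1 : y ∈ ips1
    · exact h2.1 ((hS1mem y).2 hy1)
    · exact h2.2 (hN2mem' y hh hy1)
  -- pointwise values of the signature and first-count dicts
  have hK1 : ∀ y, st1.1.get? y = if y ∈ ips1 then some 1 else none := by
    intro y; rw [hst1, phase1_key]; simp
  have hF1 : ∀ y, st1.2.getD y 0 = if y ∈ ips1 then (ips1.count y : Int) else 0 := by
    intro y; rw [hst1, phase1_first]; simp
  have hK2 : ∀ y, st2.1.get? y = (if y ∈ ips1 then (if y ∈ ips2 then some 12 else some 1)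
      else if y ∈ ips2 then some 2 else none) := by
    intro y; rw [hst2, phase2_key', hK1 y]
    by_cases h1 : y ∈ ips1 <;> by_cases h2 : y ∈ ips2 <;> simp [h1, h2]
  have hF2 : ∀ y, st2.2.getD y 0 = (if y ∈ ips1 then (ips1.count y : Int)
      else if y ∈ ips2 then (ips2.count y : Int) else 0) := by
    intro y; rw [hst2, phase2_first', hK1 y, hF1 y]
    by_cases h1 : y ∈ ips1 <;> by_cases h2 : y ∈ ips2 <;> simp [h1, h2]
  have h0 : ∀ z k, st2.1.get? z = some k → k ≠ 0 := by
    intro z k hz; rw [hK2 z] at hz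
    split_ifs at hz <;> simp_all <;> omega
  have hm1 : PySem.Int.mod 1 10 = 1 := by decide
  have hm2 : PySem.Int.mod 2 10 = 2 := by decide
  have hm12 : PySem.Int.mod 12 10 = 2 := by decide
  have hK3 : ∀ y, st3.1.get? y = (if y ∈ ips1 then
        (if y ∈ ips2 then (if y ∈ ips3 then some 123 else some 12)
         else (if y ∈ ips3 then some 13 else some 1))
      else if y ∈ ips2 then (if y ∈ ips3 then some 23 else some 2)
      else if y ∈ ips3 then some 3 else none) := by
    intro y; rw [hst3, phase3_key', hK2 y]
    by_cases h1 : y ∈ ips1 <;> by_cases h2 : y ∈ ips2 <;> by_cases h3 : y ∈ ips3 <;>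
      simp [h1, h2, h3, hm1, hm2, hm12]
  have hF3 : ∀ y, st3.2.getD y 0 = (if y ∈ ips1 then (ips1.count y : Int)
      else if y ∈ ips2 then (ips2.count y : Int)
      else if y ∈ ips3 then (ips3.count y : Int) else 0) := by
    intro y; rw [hst3, phase3_first' _ _ _ h0, hK2 y, hF2 y]
    by_cases h1 : y ∈ ips1 <;> by_cases h2 : y ∈ ips2 <;> by_cases h3 : y ∈ ips3 <;>
      simp [h1, h2, h3, hm1, hm2, hm12]
  -- keys of the signature dict: three disjoint segments in insertion order
  have hkeysu : st3.1.keys = PySem.Set.update (PySem.Set.update (PySem.Set.update [] ips1) ips2) ips3 := by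
    rw [hst3, phase3_keys', hst2, phase2_keys', hst1, phase1_keys, PySem.Dict.keys_empty]
  have hnd : st3.1.keys.Nodup := by
    rw [hkeysu]
    exact nodup_update _ _ (nodup_update _ _ (nodup_update _ _ List.nodup_nil))
  have hkeys : st3.1.keys = pvNew [] ips1 ++ pvNew (pvNew [] ips1) ips2
      ++ pvNew (pvNew [] ips1 ++ pvNew (pvNew [] ips1) ips2) ips3 := by
    rw [hkeysu, update_eq_append_pvNew, update_eq_append_pvNew, update_eq_append_pvNew,
      List.nil_append]
  have hitems : st3.1.items = (pvNew [] ips1 ++ pvNew (pvNew [] ips1) ips2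
      ++ pvNew (pvNew [] ips1 ++ pvNew (pvNew [] ips1) ips2) ips3).map
        (fun k => (k, st3.1.getD k 0)) := by
    rw [PySem.Dict.items_eq_map_keys st3.1 hnd 0, hkeys]
  have hG : ∀ k, st3.1.getD k 0 = (st3.1.get? k).getD 0 := by
    intro k; rw [PySem.Dict.getD_eq_get?_getD]
  -- closed values of the signature and first-count on each segment
  have hval1 : ∀ k ∈ pvNew [] ips1, st3.1.getD k 0
      = (if ips2.contains k then (if ips3.contains k then (123:Int) else 12)
         else if ips3.contains k then 13 else 1) := by
    intro k hk
    have h1 : k ∈ ips1 := (hS1mem k).1 hk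
    rw [hG k, hK3 k]
    by_cases h2 : k ∈ ips2 <;> by_cases h3 : k ∈ ips3 <;>
      simp [h1, h2, h3, List.contains_eq_mem]
  have hval2 : ∀ k ∈ pvNew (pvNew [] ips1) ips2, st3.1.getD k 0
      = (if ips3.contains k then (23:Int) else 2) := by
    intro k hk
    obtain ⟨h2, h1⟩ := hN2mem k hk
    rw [hG k, hK3 k]
    by_cases h3 : k ∈ ips3 <;> simp [h1, h2, h3, List.contains_eq_mem]
  have hval3 : ∀ k ∈ pvNew (pvNew [] ips1 ++ pvNew (pvNew [] ips1) ips2) ips3,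
      st3.1.getD k 0 = (3:Int) := by
    intro k hk
    obtain ⟨h3, h1, h2⟩ := hN3mem k hk
    rw [hG k, hK3 k]
    simp [h1, h2, h3]
  have hfv1 : ∀ k ∈ pvNew [] ips1, st3.2.getD k 0 = (ips1.count k : Int) := by
    intro k hk
    have h1 : k ∈ ips1 := (hS1mem k).1 hk
    rw [hF3 k]; simp [h1]
  have hfv2 : ∀ k ∈ pvNew (pvNew [] ips1) ips2, st3.2.getD k 0 = (ips2.count k : Int) := by
    intro k hk
    obtain ⟨h2, h1⟩ := hN2mem k hk
    rw [hF3 k]; simp [h1, h2]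
  have hfv3 : ∀ k ∈ pvNew (pvNew [] ips1 ++ pvNew (pvNew [] ips1) ips2) ips3,
      st3.2.getD k 0 = (ips3.count k : Int) := by
    intro k hk
    obtain ⟨h3, h1, h2⟩ := hN3mem k hk
    rw [hF3 k]; simp [h1, h2, h3]
  -- every stored signature is one of the 7 slots
  have hslots : ∀ p ∈ (pvNew [] ips1 ++ pvNew (pvNew [] ips1) ips2
      ++ pvNew (pvNew [] ips1 ++ pvNew (pvNew [] ips1) ips2) ips3).map
        (fun k => (k, st3.1.getD k 0)),
      p.2 = 1 ∨ p.2 = 2 ∨ p.2 = 3 ∨ p.2 = 12 ∨ p.2 = 13 ∨ p.2 = 23 ∨ p.2 = 123 := by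
    intro p hp
    rw [List.mem_map] at hp; obtain ⟨k, hk, rfl⟩ := hp
    rcases List.mem_append.1 hk with hk' | hk3
    · rcases List.mem_append.1 hk' with hk1 | hk2
      · rw [hval1 k hk1]
        cases hc2 : ips2.contains k <;> cases hc3 : ips3.contains k <;> simp [hc2, hc3]
      · rw [hval2 k hk2]
        cases hc3 : ips3.contains k <;> simp [hc3]
    · rw [hval3 k hk3]; simp
  have hof : (PySem.Dict.ofList [((1:Int),(0:Int)),(2,0),(3,0),(12,0),(13,0),(23,0),(123,0)])
      = PySem.Dict.mk [(1,0),(2,0),(3,0),(12,0),(13,0),(23,0),(123,0)] := rfl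
  rw [hof, loopA1, loopA2, loopA3, hitems,
    aggLoop _ (fun ip => st3.2.getD ip 0) 0 0 0 0 0 0 0 hslots]
  dsimp only
  -- split each slot sum over the three segments
  have hsplit : ∀ (v : Int) (F : String → Int),
      (List.map (fun p => F p.1) (List.filter (fun p => p.2 == v)
        (List.map (fun k => (k, st3.1.getD k 0)) (pvNew [] ips1 ++ pvNew (pvNew [] ips1) ips2
          ++ pvNew (pvNew [] ips1 ++ pvNew (pvNew [] ips1) ips2) ips3)))).sum
      = (((pvNew [] ips1).filter (fun k => st3.1.getD k 0 == v)).map F).sum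
        + (((pvNew (pvNew [] ips1) ips2).filter (fun k => st3.1.getD k 0 == v)).map F).sum
        + (((pvNew (pvNew [] ips1 ++ pvNew (pvNew [] ips1) ips2) ips3).filter
            (fun k => st3.1.getD k 0 == v)).map F).sum := by
    intro v F
    simp only [List.filter_map, List.map_map, List.filter_append, List.map_append,
      List.sum_append, Function.comp_def]
  rw [hsplit 1 (fun k => st3.2.getD k 0), hsplit 2 (fun k => st3.2.getD k 0),
    hsplit 3 (fun k => st3.2.getD k 0), hsplit 12 (fun k => st3.2.getD k 0),
    hsplit 13 (fun k => st3.2.getD k 0), hsplit 23 (fun k => st3.2.getD k 0),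
    hsplit 123 (fun k => st3.2.getD k 0)]
  -- segments that contribute nothing to a slot
  have hz1 : ∀ v : Int, v ≠ 1 → v ≠ 12 → v ≠ 13 → v ≠ 123 →
      (pvNew [] ips1).filter (fun k => st3.1.getD k 0 == v) = [] := by
    intro v h1 h2 h3 h4
    refine List.filter_eq_nil_iff.2 (fun k hk => ?_)
    rw [hval1 k hk]
    cases hc2 : ips2.contains k <;> cases hc3 : ips3.contains k <;>
      simp [hc2, hc3, beq_iff_eq] <;> omega
  have hz2 : ∀ v : Int, v ≠ 2 → v ≠ 23 →
      (pvNew (pvNew [] ips1) ips2).filter (fun k => st3.1.getD k 0 == v) = [] := by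
    intro v h1 h2
    refine List.filter_eq_nil_iff.2 (fun k hk => ?_)
    rw [hval2 k hk]
    cases hc3 : ips3.contains k <;> simp [hc3, beq_iff_eq] <;> omega
  have hz3 : ∀ v : Int, v ≠ 3 →
      (pvNew (pvNew [] ips1 ++ pvNew (pvNew [] ips1) ips2) ips3).filter
        (fun k => st3.1.getD k 0 == v) = [] := by
    intro v h1
    refine List.filter_eq_nil_iff.2 (fun k hk => ?_)
    rw [hval3 k hk]
    simp [beq_iff_eq]; omega
  rw [hz2 1 (by norm_num) (by norm_num), hz3 1 (by norm_num),
    hz1 2 (by norm_num) (by norm_num) (by norm_num) (by norm_num), hz3 2 (by norm_num),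
    hz1 3 (by norm_num) (by norm_num) (by norm_num) (by norm_num), hz2 3 (by norm_num) (by norm_num),
    hz2 12 (by norm_num) (by norm_num), hz3 12 (by norm_num),
    hz2 13 (by norm_num) (by norm_num), hz3 13 (by norm_num),
    hz1 23 (by norm_num) (by norm_num) (by norm_num) (by norm_num), hz3 23 (by norm_num),
    hz2 123 (by norm_num) (by norm_num), hz3 123 (by norm_num)]
  have hv1 : (List.map (fun k => st3.2.getD k 0)
      (List.filter (fun k => st3.1.getD k 0 == 1) (pvNew [] ips1))).sum
      = ((ips1.filter (fun ip => !ips2.contains ip && !ips3.contains ip)).length : Int) := by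
    have hfc : (pvNew [] ips1).filter (fun k => st3.1.getD k 0 == 1)
        = (pvNew [] ips1).filter (fun k => !ips2.contains k && !ips3.contains k) :=
      List.filter_congr (fun k hk => by
        rw [hval1 k hk]
        cases hc2 : ips2.contains k <;> cases hc3 : ips3.contains k <;> simp [hc2, hc3])
    have hmc : ((pvNew [] ips1).filter (fun k => !ips2.contains k && !ips3.contains k)).map (fun k => st3.2.getD k 0)
        = ((pvNew [] ips1).filter (fun k => !ips2.contains k && !ips3.contains k)).map (fun k => (ips1.count k : Int)) :=
      List.map_congr_left (fun k hk => hfv1 k (List.mem_of_mem_filter hk))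
    rw [hfc, hmc, pvNew_sum_count]
    have hcg : ∀ y ∈ ips1, ((!ips2.contains y && !ips3.contains y) && !(([] : List String).contains y))
        = (!ips2.contains y && !ips3.contains y) := fun y hy => by simp [Bool.and_comm]
    rw [List.filter_congr hcg]
  have hv12 : (List.map (fun k => st3.2.getD k 0)
      (List.filter (fun k => st3.1.getD k 0 == 12) (pvNew [] ips1))).sum
      = ((ips1.filter (fun ip => ips2.contains ip && !ips3.contains ip)).length : Int) := by
    have hfc : (pvNew [] ips1).filter (fun k => st3.1.getD k 0 == 12)
        = (pvNew [] ips1).filter (fun k => ips2.contains k && !ips3.contains k) :=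
      List.filter_congr (fun k hk => by
        rw [hval1 k hk]
        cases hc2 : ips2.contains k <;> cases hc3 : ips3.contains k <;> simp [hc2, hc3])
    have hmc : ((pvNew [] ips1).filter (fun k => ips2.contains k && !ips3.contains k)).map (fun k => st3.2.getD k 0)
        = ((pvNew [] ips1).filter (fun k => ips2.contains k && !ips3.contains k)).map (fun k => (ips1.count k : Int)) :=
      List.map_congr_left (fun k hk => hfv1 k (List.mem_of_mem_filter hk))
    rw [hfc, hmc, pvNew_sum_count]
    have hcg : ∀ y ∈ ips1, ((ips2.contains y && !ips3.contains y) && !(([] : List String).contains y))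
        = (ips2.contains y && !ips3.contains y) := fun y hy => by simp [Bool.and_comm]
    rw [List.filter_congr hcg]
  have hv13 : (List.map (fun k => st3.2.getD k 0)
      (List.filter (fun k => st3.1.getD k 0 == 13) (pvNew [] ips1))).sum
      = ((ips1.filter (fun ip => !ips2.contains ip && ips3.contains ip)).length : Int) := by
    have hfc : (pvNew [] ips1).filter (fun k => st3.1.getD k 0 == 13)
        = (pvNew [] ips1).filter (fun k => !ips2.contains k && ips3.contains k) :=
      List.filter_congr (fun k hk => by
        rw [hval1 k hk]
        cases hc2 : ips2.contains k <;> cases hc3 : ips3.contains k <;> simp [hc2, hc3])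
    have hmc : ((pvNew [] ips1).filter (fun k => !ips2.contains k && ips3.contains k)).map (fun k => st3.2.getD k 0)
        = ((pvNew [] ips1).filter (fun k => !ips2.contains k && ips3.contains k)).map (fun k => (ips1.count k : Int)) :=
      List.map_congr_left (fun k hk => hfv1 k (List.mem_of_mem_filter hk))
    rw [hfc, hmc, pvNew_sum_count]
    have hcg : ∀ y ∈ ips1, ((!ips2.contains y && ips3.contains y) && !(([] : List String).contains y))
        = (!ips2.contains y && ips3.contains y) := fun y hy => by simp [Bool.and_comm]
    rw [List.filter_congr hcg]
  have hv123 : (List.map (fun k => st3.2.getD k 0)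
      (List.filter (fun k => st3.1.getD k 0 == 123) (pvNew [] ips1))).sum
      = ((ips1.filter (fun ip => ips2.contains ip && ips3.contains ip)).length : Int) := by
    have hfc : (pvNew [] ips1).filter (fun k => st3.1.getD k 0 == 123)
        = (pvNew [] ips1).filter (fun k => ips2.contains k && ips3.contains k) :=
      List.filter_congr (fun k hk => by
        rw [hval1 k hk]
        cases hc2 : ips2.contains k <;> cases hc3 : ips3.contains k <;> simp [hc2, hc3])
    have hmc : ((pvNew [] ips1).filter (fun k => ips2.contains k && ips3.contains k)).map (fun k => st3.2.getD k 0)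
        = ((pvNew [] ips1).filter (fun k => ips2.contains k && ips3.contains k)).map (fun k => (ips1.count k : Int)) :=
      List.map_congr_left (fun k hk => hfv1 k (List.mem_of_mem_filter hk))
    rw [hfc, hmc, pvNew_sum_count]
    have hcg : ∀ y ∈ ips1, ((ips2.contains y && ips3.contains y) && !(([] : List String).contains y))
        = (ips2.contains y && ips3.contains y) := fun y hy => by simp [Bool.and_comm]
    rw [List.filter_congr hcg]
  have hv2 : (List.map (fun k => st3.2.getD k 0)
      (List.filter (fun k => st3.1.getD k 0 == 2) (pvNew (pvNew [] ips1) ips2))).sum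
      = ((ips2.filter (fun ip => !ips1.contains ip && !ips3.contains ip)).length : Int) := by
    have hfc : (pvNew (pvNew [] ips1) ips2).filter (fun k => st3.1.getD k 0 == 2)
        = (pvNew (pvNew [] ips1) ips2).filter (fun k => !ips3.contains k) :=
      List.filter_congr (fun k hk => by
        rw [hval2 k hk]
        cases hc3 : ips3.contains k <;> simp [hc3])
    have hmc : ((pvNew (pvNew [] ips1) ips2).filter (fun k => !ips3.contains k)).map (fun k => st3.2.getD k 0)
        = ((pvNew (pvNew [] ips1) ips2).filter (fun k => !ips3.contains k)).map (fun k => (ips2.count k : Int)) :=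
      List.map_congr_left (fun k hk => hfv2 k (List.mem_of_mem_filter hk))
    rw [hfc, hmc, pvNew_sum_count]
    have hcg : ∀ y ∈ ips2, ((!ips3.contains y) && !((pvNew [] ips1).contains y))
        = (!ips1.contains y && !ips3.contains y) := fun y hy => by
      simp [List.contains_eq_mem, hS1mem y, Bool.and_comm]
    rw [List.filter_congr hcg]
  have hv23 : (List.map (fun k => st3.2.getD k 0)
      (List.filter (fun k => st3.1.getD k 0 == 23) (pvNew (pvNew [] ips1) ips2))).sum
      = ((ips2.filter (fun ip => !ips1.contains ip && ips3.contains ip)).length : Int) := by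
    have hfc : (pvNew (pvNew [] ips1) ips2).filter (fun k => st3.1.getD k 0 == 23)
        = (pvNew (pvNew [] ips1) ips2).filter (fun k => ips3.contains k) :=
      List.filter_congr (fun k hk => by
        rw [hval2 k hk]
        cases hc3 : ips3.contains k <;> simp [hc3])
    have hmc : ((pvNew (pvNew [] ips1) ips2).filter (fun k => ips3.contains k)).map (fun k => st3.2.getD k 0)
        = ((pvNew (pvNew [] ips1) ips2).filter (fun k => ips3.contains k)).map (fun k => (ips2.count k : Int)) :=
      List.map_congr_left (fun k hk => hfv2 k (List.mem_of_mem_filter hk))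
    rw [hfc, hmc, pvNew_sum_count]
    have hcg : ∀ y ∈ ips2, ((ips3.contains y) && !((pvNew [] ips1).contains y))
        = (!ips1.contains y && ips3.contains y) := fun y hy => by
      simp [List.contains_eq_mem, hS1mem y, Bool.and_comm]
    rw [List.filter_congr hcg]
  have hv3 : (List.map (fun k => st3.2.getD k 0)
      (List.filter (fun k => st3.1.getD k 0 == 3) (pvNew (pvNew [] ips1 ++ pvNew (pvNew [] ips1) ips2) ips3))).sum
      = ((ips3.filter (fun ip => !ips1.contains ip && !ips2.contains ip)).length : Int) := by
    have hfc : (pvNew (pvNew [] ips1 ++ pvNew (pvNew [] ips1) ips2) ips3).filter (fun k => st3.1.getD k 0 == 3)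
        = (pvNew (pvNew [] ips1 ++ pvNew (pvNew [] ips1) ips2) ips3).filter (fun k => true) :=
      List.filter_congr (fun k hk => by rw [hval3 k hk]; simp)
    have hmc : ((pvNew (pvNew [] ips1 ++ pvNew (pvNew [] ips1) ips2) ips3).filter (fun k => true)).map (fun k => st3.2.getD k 0)
        = ((pvNew (pvNew [] ips1 ++ pvNew (pvNew [] ips1) ips2) ips3).filter (fun k => true)).map (fun k => (ips3.count k : Int)) :=
      List.map_congr_left (fun k hk => hfv3 k (List.mem_of_mem_filter hk))
    rw [hfc, hmc, pvNew_sum_count]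
    have hcg : ∀ y ∈ ips3, ((true : Bool) && !((pvNew [] ips1 ++ pvNew (pvNew [] ips1) ips2).contains y))
        = (!ips1.contains y && !ips2.contains y) := by
      intro y hy
      by_cases hy1 : y ∈ ips1
      · simp [List.contains_append, List.contains_eq_mem, hy1, hS1mem]
      · by_cases hy2 : y ∈ ips2
        · have hn2 : y ∈ pvNew (pvNew [] ips1) ips2 := hN2mem' y hy2 hy1
          simp [List.contains_append, List.contains_eq_mem, hy1, hy2, hn2]
        · have hn2 : y ∉ pvNew (pvNew [] ips1) ips2 := fun h => hy2 (hN2mem y h).1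
          simp [List.contains_append, List.contains_eq_mem, hy1, hy2, hn2, hS1mem]
    rw [List.filter_congr hcg]
  rw [hv1, hv2, hv3, hv12, hv13, hv23, hv123]
  simp

-- ===== VERDICT (by name: the statement is the Claim_ definition above) =====
theorem get_overlapping_spec : Claim_equal_get_overlapping := by
  intro ips1 ips2 ips3 _
  exact main_eq ips1 ips2 ips3
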